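-- pv_equiv track=rewrite | github.com/vachan12/prn_finder | main.py | binary_search_records_by_prn_suffix
-- ===== SOURCE A (Python) =====
-- def binary_search_records_by_prn_suffix(sorted_records: list[dict], target: int) -> list[dict]:
--     keys = [int(rec.get("prn", "")[-2:]) if rec.get("prn", "").isdigit() and len(rec.get("prn", "")) >= 2 else -1 for rec in sorted_records]
--     lo = 0
--     hi = len(keys) - 1
--     found_index = None
--     while lo <= hi:
--         mid = (lo + hi) // 2
--         if keys[mid] == target:
--             found_index = mid
--             break
--         if keys[mid] < target:
--             lo = mid + 1
--         else:
--             hi = mid - 1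
--     if found_index is None:
--         return []
--     start = found_index
--     while start - 1 >= 0 and keys[start - 1] == target:
--         start -= 1
--     end = found_index
--     while end + 1 < len(keys) and keys[end + 1] == target:
--         end += 1
--     return sorted_records[start : end + 1]
-- ===== SOURCE B (Python) =====
-- def _prn_suffix_key(rec):
--     p = rec.get("prn", "")
--     return int(p[-2:]) if p.isdigit() and len(p) >= 2 else -1
--
--
-- def binary_search_records_by_prn_suffix(sorted_records: list[dict], target: int) -> list[dict]:
--     # On records sorted by suffix key, the matching records form one contiguous
--     # run, so a single filter pass returns exactly that run.
--     return [rec for rec in sorted_records if _prn_suffix_key(rec) == target]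
-- ===== Notes on version B (the rewrite author's own statement) =====
-- stated objective: simpler
-- what changed: B replaces A's binary search plus bidirectional run-expansion with a single filter pass: on input sorted by PRN-suffix key the matching records form one contiguous run, which is exactly what the filter returns.
-- outside the precondition, e.g. on binary_search_records_by_prn_suffix([{'prn': '11'}, {'prn': '10'}], 10): A returns [], B returns [{'prn': '10'}]
import Mathlib
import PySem

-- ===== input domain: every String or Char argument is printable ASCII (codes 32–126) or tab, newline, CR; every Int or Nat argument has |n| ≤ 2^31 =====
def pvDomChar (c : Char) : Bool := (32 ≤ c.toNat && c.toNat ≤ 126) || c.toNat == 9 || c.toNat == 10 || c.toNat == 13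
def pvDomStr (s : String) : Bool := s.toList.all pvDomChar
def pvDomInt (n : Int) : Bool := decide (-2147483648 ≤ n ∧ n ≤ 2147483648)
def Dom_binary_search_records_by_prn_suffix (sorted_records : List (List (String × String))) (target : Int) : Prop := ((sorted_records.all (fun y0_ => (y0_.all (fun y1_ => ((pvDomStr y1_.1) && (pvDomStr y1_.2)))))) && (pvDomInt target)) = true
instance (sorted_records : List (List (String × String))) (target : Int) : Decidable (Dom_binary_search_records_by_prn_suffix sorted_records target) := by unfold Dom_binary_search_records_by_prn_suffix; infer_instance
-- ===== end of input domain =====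

-- B replaces A's binary search + bidirectional run-expansion by a single filter pass:
-- on records sorted by PRN-suffix key (the function's documented precondition, stated as Pre_)
-- the matching records form one contiguous run, which is exactly what the filter returns.

-- ===== PORT A =====
-- the comprehension's element expression:
-- int(rec.get("prn","")[-2:]) if rec.get("prn","").isdigit() and len(rec.get("prn","")) >= 2 else -1
def pvKeyA (rec : List (String × String)) : Int :=
  if PySem.Str.strIsdigit (PySem.Dict.getD (PySem.Dict.mk rec) "prn" "") = true ∧
     PySem.Str.len (PySem.Dict.getD (PySem.Dict.mk rec) "prn" "") ≥ 2 then
    (PySem.Int.ofStr? (PySem.Str.slice (PySem.Dict.getD (PySem.Dict.mk rec) "prn" "") (some (-2)) none)).getD 0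
  else -1

-- while lo <= hi: binary search for found_index (break = some mid; loop exit = none)
def pvLoopA (keys : List Int) (target : Int) (lo hi : Int) : Option Int :=
  if h : lo ≤ hi then
    let mid := PySem.Int.floordiv (lo + hi) 2
    match PySem.List.pyGet? keys mid with
    | none => none  -- keys[mid]: IndexError unreachable (lo ≤ mid ≤ hi < len throughout)
    | some k =>
      if k = target then some mid
      else if k < target then pvLoopA keys target (mid + 1) hi
      else pvLoopA keys target lo (mid - 1)
  else none
termination_by (hi + 1 - lo).toNat
decreasing_by
  · have := PySem.Int.floordiv_two_mid_bounds h; omega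
  · have := PySem.Int.floordiv_two_mid_bounds h; omega

-- while start - 1 >= 0 and keys[start - 1] == target: start -= 1
def pvStartA (keys : List Int) (target : Int) (start : Int) : Int :=
  if h : start - 1 ≥ 0 ∧ (PySem.List.pyGet? keys (start - 1)).getD 0 = target then
    pvStartA keys target (start - 1)
  else start
termination_by start.toNat
decreasing_by omega

-- while end + 1 < len(keys) and keys[end + 1] == target: end += 1
def pvEndA (keys : List Int) (target : Int) (e : Int) : Int :=
  if h : e + 1 < (keys.length : Int) ∧ (PySem.List.pyGet? keys (e + 1)).getD 0 = target then
    pvEndA keys target (e + 1)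
  else e
termination_by ((keys.length : Int) - e).toNat
decreasing_by omega

def binary_search_records_by_prn_suffix (sorted_records : List (List (String × String))) (target : Int) : List (List (String × String)) :=
  let keys := sorted_records.map pvKeyA
  match pvLoopA keys target 0 ((keys.length : Int) - 1) with
  | none => []
  | some found_index =>
    let start := pvStartA keys target found_index
    let e := pvEndA keys target found_index
    PySem.List.slice sorted_records (some start) (some (e + 1))

-- ===== PORT B =====
-- _prn_suffix_key(rec) (same expression as A's comprehension element)
def pvKeyB (rec : List (String × String)) : Int :=
  if PySem.Str.strIsdigit (PySem.Dict.getD (PySem.Dict.mk rec) "prn" "") = true ∧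
     PySem.Str.len (PySem.Dict.getD (PySem.Dict.mk rec) "prn" "") ≥ 2 then
    (PySem.Int.ofStr? (PySem.Str.slice (PySem.Dict.getD (PySem.Dict.mk rec) "prn" "") (some (-2)) none)).getD 0
  else -1

-- [rec for rec in sorted_records if _prn_suffix_key(rec) == target]
def binary_search_records_by_prn_suffix_alt (sorted_records : List (List (String × String))) (target : Int) : List (List (String × String)) :=
  sorted_records.filter (fun rec => pvKeyB rec == target)

-- ===== PRECONDITION & SPEC =====
-- Pre_ excludes record lists whose PRN-suffix keys are not nondecreasing: binary search's
-- documented precondition ('sorted_records'); on unsorted input A's result is an accident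
-- of probe order and no particular value is specified.
def Pre_binary_search_records_by_prn_suffix (sorted_records : List (List (String × String))) (target : Int) : Prop :=
  List.Pairwise (fun a b => pvKeyA a ≤ pvKeyA b) sorted_records
instance (sorted_records : List (List (String × String))) (target : Int) : Decidable (Pre_binary_search_records_by_prn_suffix sorted_records target) := by unfold Pre_binary_search_records_by_prn_suffix; infer_instance

def pvWitness_binary_search_records_by_prn_suffix : (List (List (String × String))) × Int :=
  ([[("prn", "06")], [("prn", "07")], [("prn", "07")], [("prn", "19")]], 7)

def Spec_binary_search_records_by_prn_suffix (sorted_records : List (List (String × String))) (target : Int) (out : List (List (String × String))) : Prop := out = binary_search_records_by_prn_suffix_alt sorted_records target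
instance (sorted_records : List (List (String × String))) (target : Int) (out : List (List (String × String))) : Decidable (Spec_binary_search_records_by_prn_suffix sorted_records target out) := by unfold Spec_binary_search_records_by_prn_suffix; infer_instance

-- ===== CLAIM =====
def Claim_equal_binary_search_records_by_prn_suffix : Prop := ∀ (sorted_records : List (List (String × String))) (target : Int), Dom_binary_search_records_by_prn_suffix sorted_records target → Pre_binary_search_records_by_prn_suffix sorted_records target → Spec_binary_search_records_by_prn_suffix sorted_records target (binary_search_records_by_prn_suffix sorted_records target)

-- ===== LEMMAS AND PROOFS =====

lemma pvKey_eq (rec : List (String × String)) : pvKeyB rec = pvKeyA rec := rfl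

lemma pvGetKeys {α : Type} (f : List (String × String) → α) (records : List (List (String × String))) (i : Int)
    (h0 : 0 ≤ i) (h1 : i < (records.length : Int)) :
    PySem.List.pyGet? (records.map f) i = some (f (records[i.toNat]'(by omega))) := by
  have hm : i < ((records.map f).length : Int) := by simpa using h1
  rw [PySem.List.pyGet?_eq_some_getElem _ h0 hm]
  congr 1
  exact List.getElem_map f

-- monotone access to the keys of a sorted record list
lemma pvMono (records : List (List (String × String)))
    (hp : List.Pairwise (fun a b => pvKeyA a ≤ pvKeyA b) records)
    (i j : Nat) (hij : i ≤ j) (hj : j < records.length) :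
    pvKeyA (records[i]'(by omega)) ≤ pvKeyA (records[j]'hj) := by
  rcases Nat.lt_or_ge i j with h | h
  · exact (List.pairwise_iff_getElem.mp hp) i j (by omega) hj h
  · have : i = j := by omega
    subst this; exact le_rfl

-- binary-search loop: with occurrences confined to [lo,hi], none ⇒ no occurrence; some m ⇒ hit at m
lemma pvLoopA_spec (records : List (List (String × String))) (target : Int)
    (hp : List.Pairwise (fun a b => pvKeyA a ≤ pvKeyA b) records) :
    ∀ (n : Nat) (lo hi : Int), (hi + 1 - lo).toNat = n → 0 ≤ lo → hi < (records.length : Int) →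
    (∀ i : Nat, (hi_ : i < records.length) → pvKeyA (records[i]'hi_) = target → (lo ≤ (i : Int) ∧ (i : Int) ≤ hi)) →
    (match pvLoopA (records.map pvKeyA) target lo hi with
     | none => ∀ i : Nat, (hi_ : i < records.length) → pvKeyA (records[i]'hi_) ≠ target
     | some m => ∃ hm : m.toNat < records.length, 0 ≤ m ∧ m < (records.length : Int) ∧ pvKeyA (records[m.toNat]'hm) = target) := by
  intro n
  induction n using Nat.strong_induction_on with
  | _ n ih =>
    intro lo hi hn hlo hhi hconf
    rw [pvLoopA]
    by_cases h : lo ≤ hi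
    · rw [dif_pos h]
      have hmid := PySem.Int.floordiv_two_mid_bounds h
      simp only []
      set mid := PySem.Int.floordiv (lo + hi) 2 with hm
      rw [pvGetKeys pvKeyA records mid (by omega) (by omega)]
      simp only []
      by_cases hk : pvKeyA (records[mid.toNat]'(by omega)) = target
      · rw [if_pos hk]
        exact ⟨by omega, by omega, by omega, hk⟩
      · rw [if_neg hk]
        by_cases hlt : pvKeyA (records[mid.toNat]'(by omega)) < target
        · rw [if_pos hlt]
          refine ih _ (by omega) (mid + 1) hi rfl (by omega) hhi ?_
          intro i hi_ hti
          have hbd := hconf i hi_ hti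
          constructor
          · -- i ≤ mid would give key i ≤ key mid < target
            by_contra hc
            push_neg at hc
            have : (i : Int) ≤ mid := by omega
            have := pvMono records hp i mid.toNat (by omega) (by omega)
            omega
          · exact hbd.2
        · rw [if_neg hlt]
          refine ih _ (by omega) lo (mid - 1) rfl hlo (by omega) ?_
          intro i hi_ hti
          have hbd := hconf i hi_ hti
          refine ⟨hbd.1, ?_⟩
          by_contra hc
          push_neg at hc
          have : mid.toNat ≤ i := by omega
          have := pvMono records hp mid.toNat i this hi_
          omega
    · rw [dif_neg h]
      intro i hi_ hti
      have := hconf i hi_ hti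
      omega
-- note: the `decide`/branch shapes above must match pvLoopA exactly

-- pvStartA: result r with 0 ≤ r ≤ s, key r = target, and (r = 0 ∨ key (r-1) ≠ target)
lemma pvStartA_spec (records : List (List (String × String))) (target : Int) :
    ∀ (n : Nat) (s : Int), s.toNat = n → ∀ (h0 : 0 ≤ s) (hs : s < (records.length : Int)),
    pvKeyA (records[s.toNat]'(by omega)) = target →
    ∃ r : Int, pvStartA (records.map pvKeyA) target s = r ∧ 0 ≤ r ∧ r ≤ s ∧
      (∃ hr : r.toNat < records.length, pvKeyA (records[r.toNat]'hr) = target) ∧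
      (r = 0 ∨ ∀ hr : (r - 1).toNat < records.length, pvKeyA (records[(r-1).toNat]'hr) ≠ target) := by
  intro n
  induction n using Nat.strong_induction_on with
  | _ n ih =>
    intro s hn h0 hs hk
    rw [pvStartA]
    by_cases hge : s - 1 ≥ 0
    · rw [pvGetKeys pvKeyA records (s - 1) hge (by omega)]
      simp only [Option.getD_some]
      by_cases hkp : pvKeyA (records[(s-1).toNat]'(by omega)) = target
      · rw [dif_pos ⟨hge, hkp⟩]
        obtain ⟨r, hr⟩ := ih (s - 1).toNat (by omega) (s - 1) rfl (by omega) (by omega) hkp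
        exact ⟨r, hr.1, hr.2.1, by omega, hr.2.2.2⟩
      · rw [dif_neg (by rintro ⟨-, h⟩; exact hkp h)]
        exact ⟨s, rfl, h0, le_rfl, ⟨by omega, hk⟩, Or.inr (fun hr => hkp)⟩
    · rw [dif_neg (by rintro ⟨h, -⟩; omega)]
      exact ⟨s, rfl, h0, le_rfl, ⟨by omega, hk⟩, Or.inl (by omega)⟩

-- pvEndA: result e with s ≤ e < len, key e = target, and (e+1 = len ∨ key (e+1) ≠ target)
lemma pvEndA_spec (records : List (List (String × String))) (target : Int) :
    ∀ (n : Nat) (s : Int), ((records.length : Int) - s).toNat = n → ∀ (h0 : 0 ≤ s) (hs : s < (records.length : Int)),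
    pvKeyA (records[s.toNat]'(by omega)) = target →
    ∃ e : Int, pvEndA (records.map pvKeyA) target s = e ∧ s ≤ e ∧ e < (records.length : Int) ∧
      (∃ he : e.toNat < records.length, pvKeyA (records[e.toNat]'he) = target) ∧
      (e + 1 = (records.length : Int) ∨ ∀ he : (e + 1).toNat < records.length, pvKeyA (records[(e+1).toNat]'he) ≠ target) := by
  intro n
  induction n using Nat.strong_induction_on with
  | _ n ih =>
    intro s hn h0 hs hk
    rw [pvEndA]
    simp only [List.length_map]
    by_cases hlt : s + 1 < (records.length : Int)
    · rw [pvGetKeys pvKeyA records (s + 1) (by omega) hlt]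
      simp only [Option.getD_some]
      by_cases hkp : pvKeyA (records[(s+1).toNat]'(by omega)) = target
      · rw [dif_pos ⟨hlt, hkp⟩]
        obtain ⟨e, he⟩ := ih ((records.length : Int) - (s + 1)).toNat (by omega) (s + 1) rfl (by omega) hlt hkp
        exact ⟨e, he.1, by omega, he.2.2.1, he.2.2.2⟩
      · rw [dif_neg (by rintro ⟨-, h⟩; exact hkp h)]
        exact ⟨s, rfl, le_rfl, hs, ⟨by omega, hk⟩, Or.inr (fun he => hkp)⟩
    · rw [dif_neg (by rintro ⟨h, -⟩; omega)]
      exact ⟨s, rfl, le_rfl, hs, ⟨by omega, hk⟩, Or.inl (by omega)⟩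

-- filter of an interval-characterised predicate is the corresponding drop/take slice
lemma pvFilterSlice {α : Type} (p : α → Bool) :
    ∀ (l : List α) (s t : Nat), s ≤ t → t ≤ l.length →
    (∀ i : Nat, (hi : i < l.length) → (p (l[i]'hi) = true ↔ (s ≤ i ∧ i < t))) →
    l.filter p = (l.drop s).take (t - s) := by
  intro l
  induction l with
  | nil =>
    intro s t hst ht _
    simp only [List.length_nil, Nat.le_zero] at ht
    subst ht
    simp
  | cons a l ihl =>
    intro s t hst ht hchar
    have hchar0 := hchar 0 (by simp)
    simp only [List.getElem_cons_zero] at hchar0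
    have hcharS : ∀ i : Nat, (hi : i < l.length) → (p (l[i]'hi) = true ↔ (s ≤ i + 1 ∧ i + 1 < t)) := by
      intro i hi
      have := hchar (i + 1) (by simpa using Nat.succ_lt_succ hi)
      simpa using this
    rcases Nat.eq_zero_or_pos s with hs0 | hsp
    · subst hs0
      rcases Nat.eq_zero_or_pos t with ht0 | htp
      · subst ht0
        have htail : l.filter p = [] := by
          rw [List.filter_eq_nil_iff]
          intro x hx
          obtain ⟨i, hi, hxe⟩ := List.mem_iff_getElem.mp hx
          have hc := hcharS i hi
          rw [hxe] at hc
          exact fun h => absurd (hc.mp h) (by omega)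
        have hpa : p a = false :=
          Bool.eq_false_iff.mpr (fun h => absurd (hchar0.mp h) (by omega))
        simp [List.filter_cons, hpa, htail]
      · have hpa : p a = true := hchar0.mpr ⟨Nat.le_refl 0, htp⟩
        have hrec := ihl 0 (t - 1) (Nat.zero_le _) (by simp only [List.length_cons] at ht; omega)
          (by intro i hi; rw [hcharS i hi]; omega)
        rw [List.filter_cons, if_pos hpa]
        simp only [List.drop_zero] at hrec ⊢
        have hte : t - 0 = (t - 1) + 1 := by omega
        rw [hte, List.take_succ_cons, hrec]
        simp
    · have hpa : p a = false :=
        Bool.eq_false_iff.mpr (fun h => absurd (hchar0.mp h) (by omega))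
      have hrec := ihl (s - 1) (t - 1) (by omega) (by simp only [List.length_cons] at ht; omega)
        (by intro i hi; rw [hcharS i hi]; omega)
      rw [List.filter_cons, if_neg (by rw [hpa]; exact Bool.false_ne_true)]
      have hd : (a :: l).drop s = l.drop (s - 1) := by
        have hse : s = (s - 1) + 1 := by omega
        rw [hse, List.drop_succ_cons]
        simp
      rw [hd]
      have hts : t - s = (t - 1) - (s - 1) := by omega
      rw [hts, hrec]

-- ===== VERDICT =====
theorem binary_search_records_by_prn_suffix_spec : Claim_equal_binary_search_records_by_prn_suffix := by
  intro records target _ hpre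
  unfold Pre_binary_search_records_by_prn_suffix at hpre
  unfold Spec_binary_search_records_by_prn_suffix binary_search_records_by_prn_suffix binary_search_records_by_prn_suffix_alt
  simp only [List.length_map]
  have hmain := pvLoopA_spec records target hpre ((records.length : Int) - 1 + 1 - 0).toNat 0 ((records.length : Int) - 1) rfl le_rfl (by omega) (fun i hi_ _ => by omega)
  cases hL : pvLoopA (records.map pvKeyA) target 0 ((records.length : Int) - 1) with
  | none =>
    rw [hL] at hmain
    simp only []
    symm
    rw [List.filter_eq_nil_iff]
    intro x hx
    obtain ⟨i, hi, hxe⟩ := List.mem_iff_getElem.mp hx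
    simp only [beq_iff_eq, pvKey_eq]
    rw [← hxe]
    exact hmain i hi
  | some m =>
    rw [hL] at hmain
    obtain ⟨hmlt, hm0, hmlen, hmk⟩ := hmain
    obtain ⟨r, hrE, hr0, hrs, ⟨hrlt, hrk⟩, hrstop⟩ :=
      pvStartA_spec records target m.toNat m rfl hm0 hmlen hmk
    obtain ⟨e, heE, hse, helen, ⟨helt, hek⟩, hestop⟩ :=
      pvEndA_spec records target ((records.length : Int) - m).toNat m rfl hm0 hmlen hmk
    simp only [hrE, heE]
    -- characterise the occurrence set as the interval [r, e]
    have hchar : ∀ i : Nat, (hi : i < records.length) →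
        ((fun rec => pvKeyB rec == target) (records[i]'hi) = true ↔ (r.toNat ≤ i ∧ i < (e + 1).toNat)) := by
      intro i hi
      simp only [beq_iff_eq, pvKey_eq]
      constructor
      · intro hit
        constructor
        · by_contra hc
          push_neg at hc
          rcases hrstop with h0 | hne
          · omega
          · -- i ≤ r - 1 : key i ≤ key (r-1) < target  (key (r-1) ≤ key r = target, ≠ target)
            have hr1 : (r - 1).toNat < records.length := by omega
            have h1 := pvMono records hpre (r-1).toNat r.toNat (by omega) hrlt
            have h2 := pvMono records hpre i (r-1).toNat (by omega) hr1
            have := hne hr1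
            omega
        · by_contra hc
          push_neg at hc
          rcases hestop with h0 | hne
          · omega
          · have he1 : (e + 1).toNat < records.length := by omega
            have h1 := pvMono records hpre e.toNat (e+1).toNat (by omega) he1
            have h2 := pvMono records hpre (e+1).toNat i (by omega) hi
            have := hne he1
            omega
      · intro ⟨h1, h2⟩
        have ha := pvMono records hpre r.toNat i h1 hi
        have hb := pvMono records hpre i e.toNat (by omega) helt
        omega
    have hfs := pvFilterSlice (fun rec => pvKeyB rec == target) records r.toNat (e + 1).toNat
      (by omega) (by omega) hchar
    rw [PySem.List.slice_toNat _ hr0 (by omega)]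
    rw [hfs]
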